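-- pv_equiv track=rewrite | github.com/ramaarguello/parcial_progra | Funciones.py | es_letra
-- ===== SOURCE A (Python) =====
-- def es_letra(nombre:str) -> bool:
--     if len(nombre) < 3:
--         return False
--
--     valido = True
--     for i in range(len(nombre)):
--         valor_ascii = ord(nombre[i])
--         if valor_ascii > 122 or valor_ascii < 97 and valor_ascii > 90 or valor_ascii < 65 and valor_ascii != 32:
--             valido = False
--             break
--
--     return valido
-- ===== SOURCE B (Python) =====
-- import re
--
-- def es_letra(nombre: str) -> bool:
--     return bool(re.fullmatch(r'[A-Za-z ]{3,}', nombre))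
-- ===== Notes on version B (the rewrite author's own statement) =====
-- stated objective: idiomatic
-- what changed: Replaced the manual ord-based loop with a break flag by a single regex fullmatch r'[A-Za-z ]{3,}' whose {3,} quantifier folds in the length guard.
import Mathlib
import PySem

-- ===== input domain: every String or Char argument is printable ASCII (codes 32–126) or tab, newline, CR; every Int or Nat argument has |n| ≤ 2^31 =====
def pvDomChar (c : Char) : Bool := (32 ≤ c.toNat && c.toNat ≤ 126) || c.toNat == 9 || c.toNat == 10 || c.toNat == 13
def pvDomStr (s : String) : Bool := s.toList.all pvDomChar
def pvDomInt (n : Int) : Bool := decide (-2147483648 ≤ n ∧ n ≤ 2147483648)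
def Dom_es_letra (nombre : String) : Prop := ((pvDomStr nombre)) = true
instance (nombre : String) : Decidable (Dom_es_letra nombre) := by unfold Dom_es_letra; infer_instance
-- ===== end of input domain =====

-- B replaces A's manual ord-based scan-with-break by a single full-match against the
-- character class [A-Za-z ] with length ≥ 3 (a regex fullmatch in Python): more idiomatic.

-- ===== PORT A =====
-- the for-loop with `break`: stops with False at the first offending character
def esLetraLoopA : List Char → Bool
  | [] => true
  | c :: cs =>
    let v := c.toNat
    if v > 122 || (v < 97 && v > 90) || (v < 65 && v != 32) then false
    else esLetraLoopA cs

def es_letra (nombre : String) : Bool :=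
  if nombre.toList.length < 3 then false
  else esLetraLoopA nombre.toList

-- ===== PORT B =====
-- Source B's re.fullmatch(r'[A-Za-z ]{3,}', nombre): every character lies in the class
-- [A-Za-z ] and the length is at least 3 (ported as the predicate the regex denotes)
def esLetraClassB (c : Char) : Bool :=
  (65 ≤ c.toNat && c.toNat ≤ 90) || (97 ≤ c.toNat && c.toNat ≤ 122) || c.toNat == 32

def es_letra_alt (nombre : String) : Bool :=
  decide (3 ≤ nombre.toList.length) && nombre.toList.all esLetraClassB

-- ===== PRECONDITION & SPEC =====
def Spec_es_letra (nombre : String) (out : Bool) : Prop := out = es_letra_alt nombre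
instance (nombre : String) (out : Bool) : Decidable (Spec_es_letra nombre out) := by unfold Spec_es_letra; infer_instance

-- ===== CLAIM (what is proved, stated in full; the proofs are below) =====
def Claim_equal_es_letra : Prop := ∀ (nombre : String), Dom_es_letra nombre → Spec_es_letra nombre (es_letra nombre)

-- ===== LEMMAS AND PROOFS =====
theorem esLetraLoopA_eq_all (cs : List Char) : esLetraLoopA cs = cs.all esLetraClassB := by
  induction cs with
  | nil => rfl
  | cons c cs ih =>
    simp only [esLetraLoopA, List.all_cons, ih, esLetraClassB]
    by_cases h : (c.toNat > 122 || (c.toNat < 97 && c.toNat > 90) || (c.toNat < 65 && c.toNat != 32)) = true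
    · simp only [h, if_true]
      simp only [Bool.or_eq_true, Bool.and_eq_true, decide_eq_true_eq, bne_iff_ne, ne_eq] at h
      have : ¬ ((65 ≤ c.toNat && c.toNat ≤ 90) || (97 ≤ c.toNat && c.toNat ≤ 122) || c.toNat == 32) = true := by
        simp only [Bool.or_eq_true, Bool.and_eq_true, decide_eq_true_eq, beq_iff_eq]
        omega
      simp [this]
    · simp only [h]
      simp only [Bool.or_eq_true, Bool.and_eq_true, decide_eq_true_eq, bne_iff_ne, ne_eq, not_or, not_and_or, not_lt, not_not] at h
      have : ((65 ≤ c.toNat && c.toNat ≤ 90) || (97 ≤ c.toNat && c.toNat ≤ 122) || c.toNat == 32) = true := by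
        simp only [Bool.or_eq_true, Bool.and_eq_true, decide_eq_true_eq, beq_iff_eq]
        omega
      simp [this]

-- ===== VERDICT (by name: the statement is the Claim_ definition above) =====
theorem es_letra_spec : Claim_equal_es_letra := by
  intro nombre _
  unfold Spec_es_letra es_letra es_letra_alt
  by_cases h : nombre.toList.length < 3
  · rw [if_pos h, decide_eq_false (Nat.not_le.mpr h), Bool.false_and]
  · rw [if_neg h, decide_eq_true (Nat.le_of_not_lt h), Bool.true_and, esLetraLoopA_eq_all]
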